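-- pv_equiv track=rewrite | github.com/Jonasj2001/aau_ubiss | fullsetup/mqtt/subscriber/subscriber.py | find_topics
-- ===== SOURCE A (Python) =====
-- def find_topics(payload, possible_topics):
--     topics = []
--     payloads_all=[]
--     timestamps_all = []
--     payloads=[]
--     timestamps=[]
--     timestamps_now=0
--     for index in payload:
--         if index in possible_topics:
--             #topics.append(index.split("/")[1])
--             topics.append(index)
--             payloads_all.append(payloads)
--             timestamps_all.append(timestamps)
--             payloads=[]
--             timestamps = []
--             timestamps_now = 0
--             continue
--         elif index == "ts":
--             timestamps_now = 1
--             continue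
--         if timestamps_now==0:
--             payloads.append(index)
--         elif timestamps_now == 1:
--             timestamps.append(index)
--     payloads_all.append(payloads)
--     payloads_all.pop(0)
--     timestamps_all.append(timestamps)
--     timestamps_all.pop(0)
--     return topics, payloads_all, timestamps_all
-- ===== SOURCE B (Python) =====
-- def find_topics(payload, possible_topics):
--     # drop the prefix before the first topic marker
--     i = 0
--     while i < len(payload) and payload[i] not in possible_topics:
--         i += 1
--     payload = payload[i:]
--     topics, payloads_all, timestamps_all = [], [], []
--     while payload:
--         topics.append(payload[0])
--         j = 1
--         while j < len(payload) and payload[j] not in possible_topics: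
--             j += 1
--         seg = payload[1:j]
--         payload = payload[j:]
--         k = 0
--         while k < len(seg) and seg[k] != "ts":
--             k += 1
--         payloads_all.append(seg[:k])
--         timestamps_all.append([x for x in seg[k + 1:] if x != "ts"])
--     return topics, payloads_all, timestamps_all
-- ===== Notes on version B (the rewrite author's own statement) =====
-- stated objective: alternative
-- what changed: B replaces A's single pass with a per-item state flag by a segment decomposition: it drops the prefix before the first topic marker, cuts the stream into marker-headed segments, and splits each segment at its first 'ts' (filtering later 'ts' out of the timestamp part).
import Mathlib
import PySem

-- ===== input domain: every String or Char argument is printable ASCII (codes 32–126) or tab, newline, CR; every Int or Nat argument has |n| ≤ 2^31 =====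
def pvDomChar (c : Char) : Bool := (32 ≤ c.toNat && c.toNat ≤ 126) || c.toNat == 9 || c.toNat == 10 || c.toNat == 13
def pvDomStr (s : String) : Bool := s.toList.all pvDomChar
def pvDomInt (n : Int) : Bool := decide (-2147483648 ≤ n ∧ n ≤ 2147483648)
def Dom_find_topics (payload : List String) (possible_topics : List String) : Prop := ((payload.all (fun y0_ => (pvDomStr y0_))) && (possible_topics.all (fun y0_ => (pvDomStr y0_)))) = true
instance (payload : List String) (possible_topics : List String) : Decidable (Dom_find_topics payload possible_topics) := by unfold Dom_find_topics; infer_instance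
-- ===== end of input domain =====

-- B re-decomposes A's flag-machine pass as: drop prefix, cut into marker-headed segments, split each at its first "ts" (alternative decomposition, same cost).

-- ===== PORT A =====
-- the loop body of A: state = (topics, payloads_all, timestamps_all, payloads, timestamps, timestamps_now)
def stepA (possible_topics : List String)
    (s : List String × List (List String) × List (List String) × List String × List String × Int)
    (index : String) :
    List String × List (List String) × List (List String) × List String × List String × Int :=
  match s with
  | (topics, payloads_all, timestamps_all, payloads, timestamps, timestamps_now) =>
    if possible_topics.contains index then
      (topics ++ [index], payloads_all ++ [payloads], timestamps_all ++ [timestamps], [], [], 0)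
    else if index == "ts" then
      (topics, payloads_all, timestamps_all, payloads, timestamps, 1)
    else if timestamps_now == 0 then
      (topics, payloads_all, timestamps_all, payloads ++ [index], timestamps, timestamps_now)
    else if timestamps_now == 1 then
      (topics, payloads_all, timestamps_all, payloads, timestamps ++ [index], timestamps_now)
    else
      (topics, payloads_all, timestamps_all, payloads, timestamps, timestamps_now)

def find_topics (payload : List String) (possible_topics : List String) :
    List String × List (List String) × List (List String) :=
  match payload.foldl (stepA possible_topics) ([], [], [], [], [], 0) with
  | (topics, payloads_all, timestamps_all, payloads, timestamps, _) =>
    -- append(payloads) then pop(0): the appended list is nonempty, so pop(0) is exactly .tail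
    (topics, (payloads_all ++ [payloads]).tail, (timestamps_all ++ [timestamps]).tail)

-- ===== PORT B =====
def notTopic (possible_topics : List String) (y : String) : Bool := !(possible_topics.contains y)

-- 'k = 0; while k < len(seg) and seg[k] != "ts": k += 1' counts the non-"ts" prefix, then seg[:k], seg[k+1:]
def splitSeg (seg : List String) : List String × List String :=
  let k := (seg.takeWhile (fun y => !(y == "ts"))).length
  (seg.take k, (seg.drop (k + 1)).filter (fun y => !(y == "ts")))

-- the outer 'while payload:' loop of B: head is a topic marker; the inner counting loop
-- 'while j < len(payload) and payload[j] not in possible_topics' collects the segment (takeWhile/dropWhile)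
def altLoop (possible_topics : List String) : List String → List String × List (List String) × List (List String)
  | [] => ([], [], [])
  | x :: rest =>
    let seg := rest.takeWhile (notTopic possible_topics)
    let rest' := rest.dropWhile (notTopic possible_topics)
    let r := altLoop possible_topics rest'
    let s := splitSeg seg
    (x :: r.1, s.1 :: r.2.1, s.2 :: r.2.2)
  termination_by l => l.length
  decreasing_by
    exact Nat.lt_succ_of_le (List.Sublist.length_le (List.dropWhile_sublist _))

def find_topics_alt (payload : List String) (possible_topics : List String) :
    List String × List (List String) × List (List String) :=
  -- 'i = 0; while i < len(payload) and payload[i] not in possible_topics: i += 1; payload = payload[i:]'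
  altLoop possible_topics (payload.dropWhile (notTopic possible_topics))

-- ===== PRECONDITION & SPEC =====
def Spec_find_topics (payload : List String) (possible_topics : List String) (out : List String × List (List String) × List (List String)) : Prop := out = find_topics_alt payload possible_topics
instance (payload : List String) (possible_topics : List String) (out : List String × List (List String) × List (List String)) : Decidable (Spec_find_topics payload possible_topics out) := by unfold Spec_find_topics; infer_instance

-- ===== CLAIM (what is proved, stated in full; the proofs are below) =====
def Claim_equal_find_topics : Prop := ∀ (payload : List String) (possible_topics : List String), Dom_find_topics payload possible_topics → Spec_find_topics payload possible_topics (find_topics payload possible_topics)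

-- ===== LEMMAS AND PROOFS =====

-- the current (unfinished) group of A's machine, run on a marker-free prefix from state (p, tl, f)
def hp : List String → List String → List String → Int → List String × List String
  | [], p, tl, _ => (p, tl)
  | x :: r, p, tl, f =>
    if x == "ts" then hp r p tl 1
    else if f == 0 then hp r (p ++ [x]) tl f
    else if f == 1 then hp r p (tl ++ [x]) f
    else hp r p tl f

theorem hp_one (r : List String) : ∀ p tl,
    hp r p tl 1 = (p, tl ++ r.filter (fun y => !(y == "ts"))) := by
  induction r with
  | nil => intro p tl; simp [hp]
  | cons x r ih =>
    intro p tl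
    by_cases hx : x = "ts"
    · simp [hp, hx, ih]
    · have hxb : (x == "ts") = false := by simp [hx]
      simp [hp, hxb, ih, List.append_assoc]

theorem hp_zero (seg : List String) : ∀ p tl,
    hp seg p tl 0 =
      (p ++ seg.takeWhile (fun y => !(y == "ts")),
       tl ++ (seg.drop ((seg.takeWhile (fun y => !(y == "ts"))).length + 1)).filter (fun y => !(y == "ts"))) := by
  induction seg with
  | nil => intro p tl; simp [hp]
  | cons x r ih =>
    intro p tl
    by_cases hx : x = "ts"
    · simp [hp, hx, hp_one]
    · have hxb : (x == "ts") = false := by simp [hx]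
      simp [hp, hxb, ih, List.append_assoc]

theorem splitSeg_eq_hp (seg : List String) : splitSeg seg = hp seg [] [] 0 := by
  rw [hp_zero]
  simp [splitSeg]
  exact (List.prefix_iff_eq_take.mp (List.takeWhile_prefix _)).symm

-- main invariant: A's fold from a general state, finished by appending the current group,
-- equals the already-emitted parts followed by B's segment decomposition of the rest.
theorem main_inv (possible_topics : List String) (xs : List String) : ∀ p tl f t pa ta,
    ((xs.foldl (stepA possible_topics) (t, pa, ta, p, tl, f)).1,
     (xs.foldl (stepA possible_topics) (t, pa, ta, p, tl, f)).2.1 ++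
       [(xs.foldl (stepA possible_topics) (t, pa, ta, p, tl, f)).2.2.2.1],
     (xs.foldl (stepA possible_topics) (t, pa, ta, p, tl, f)).2.2.1 ++
       [(xs.foldl (stepA possible_topics) (t, pa, ta, p, tl, f)).2.2.2.2.1]) =
    (t ++ (altLoop possible_topics (xs.dropWhile (notTopic possible_topics))).1,
     pa ++ (hp (xs.takeWhile (notTopic possible_topics)) p tl f).1 ::
       (altLoop possible_topics (xs.dropWhile (notTopic possible_topics))).2.1,
     ta ++ (hp (xs.takeWhile (notTopic possible_topics)) p tl f).2 ::
       (altLoop possible_topics (xs.dropWhile (notTopic possible_topics))).2.2) := by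
  induction xs with
  | nil => intro p tl f t pa ta; simp [altLoop, hp]
  | cons x r ih =>
    intro p tl f t pa ta
    rw [List.foldl_cons]
    by_cases hm : possible_topics.contains x = true
    · have hmem : x ∈ possible_topics := by simpa using hm
      have hnt : notTopic possible_topics x = false := by unfold notTopic; rw [hm]; rfl
      rw [show stepA possible_topics (t, pa, ta, p, tl, f) x
            = (t ++ [x], pa ++ [p], ta ++ [tl], [], [], 0) from by simp [stepA, hmem]]
      rw [ih]
      simp [altLoop, hnt, hp, splitSeg_eq_hp, List.append_assoc]
    · have hnmem : x ∉ possible_topics := by simpa using hm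
      have hmf : possible_topics.contains x = false := by simpa using hm
      have hnt : notTopic possible_topics x = true := by unfold notTopic; rw [hmf]; rfl
      by_cases hx : x = "ts"
      · subst hx
        rw [show stepA possible_topics (t, pa, ta, p, tl, f) "ts"
              = (t, pa, ta, p, tl, 1) from by simp [stepA, hnmem]]
        rw [ih]
        simp [hnt, hp]
      · have hxb : (x == "ts") = false := by simp [hx]
        by_cases hf0 : f = 0
        · rw [show stepA possible_topics (t, pa, ta, p, tl, f) x
                = (t, pa, ta, p ++ [x], tl, f) from by simp [stepA, hnmem, hx, hf0]]
          rw [ih]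
          simp [hnt, hp, hxb, hf0]
        · by_cases hf1 : f = 1
          · rw [show stepA possible_topics (t, pa, ta, p, tl, f) x
                  = (t, pa, ta, p, tl ++ [x], f) from by simp [stepA, hnmem, hx, hf0, hf1]]
            rw [ih]
            simp [hnt, hp, hxb, hf0, hf1]
          · rw [show stepA possible_topics (t, pa, ta, p, tl, f) x
                  = (t, pa, ta, p, tl, f) from by simp [stepA, hnmem, hx, hf0, hf1]]
            rw [ih]
            simp [hnt, hp, hxb, hf0, hf1]

-- ===== VERDICT (by name: the statement is the Claim_ definition above) =====
theorem find_topics_spec : Claim_equal_find_topics := by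
  intro payload possible_topics _
  unfold Spec_find_topics find_topics find_topics_alt
  have h := main_inv possible_topics payload [] [] 0 [] [] []
  rcases hfold : payload.foldl (stepA possible_topics) ([], [], [], [], [], 0) with
    ⟨t', pa', ta', p', tl', f'⟩
  rw [hfold] at h
  simp only [List.nil_append, Prod.mk.injEq] at h
  obtain ⟨h1, h2, h3⟩ := h
  show (t', (pa' ++ [p']).tail, (ta' ++ [tl']).tail)
      = altLoop possible_topics (payload.dropWhile (notTopic possible_topics))
  rw [h1, h2, h3]
  simp
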